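-- pv_equiv track=rewrite | github.com/jujubamundo/desafio_0 | desafio_0/exercicio_3_avc.py | todos_subconjuntos
-- ===== SOURCE A (Python) =====
-- from itertools import chain, combinations
--
-- def todos_subconjuntos(conjunto, max_size=None, min_size=0, distinct_only=False, sort_subsets=False):
--
--     if distinct_only:
--         conjunto = list(set(conjunto))
--
--     subconjuntos = list(chain.from_iterable(combinations(conjunto, r) for r in range(min_size, (max_size or len(conjunto)) + 1)))
--
--     subconjuntos = [list(subconjunto) for subconjunto in subconjuntos]
--
--     if sort_subsets:
--         subconjuntos = [sorted(subconjunto) for subconjunto in subconjuntos]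
--
--     if sort_subsets:
--         subconjuntos.sort()
--
--     return subconjuntos
-- ===== SOURCE B (Python) =====
-- def todos_subconjuntos(conjunto, max_size=None, min_size=0, distinct_only=False, sort_subsets=False):
--     # Single recursive backtracking generator (index-lexicographic, size-ascending),
--     # instead of itertools.combinations per size + chain + listify passes.
--     pool = list(dict.fromkeys(conjunto)) if distinct_only else list(conjunto)
--     n = len(pool)
--     hi = max_size or n
--     out = []
--
--     def rec(start, need, prefix):
--         if need == 0:
--             out.append(sorted(prefix) if sort_subsets else list(prefix))
--             return
--         for i in range(start, n - need + 1):
--             prefix.append(pool[i])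
--             rec(i + 1, need - 1, prefix)
--             prefix.pop()
--
--     r = min_size
--     while r <= hi:
--         if 0 <= r <= n:
--             rec(0, r, [])
--         r += 1
--
--     if sort_subsets:
--         out.sort()
--     return out
-- ===== Notes on version B (the rewrite author's own statement) =====
-- stated objective: alternative
-- what changed: Replaces the itertools.combinations-per-size + chain + listify/sort passes with one hand-written backtracking generator that recurses over start indices, emitting each size-r combination (sorted at emission when requested) in the same size-ascending, index-lexicographic order; dedup is an order-preserving dict.fromkeys instead of list(set(...)).
-- outside the precondition, e.g. on todos_subconjuntos([3, 1], None, 1, True, False): A returns [[1], [3], [1, 3]], B returns [[3], [1], [3, 1]]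
import Mathlib
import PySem

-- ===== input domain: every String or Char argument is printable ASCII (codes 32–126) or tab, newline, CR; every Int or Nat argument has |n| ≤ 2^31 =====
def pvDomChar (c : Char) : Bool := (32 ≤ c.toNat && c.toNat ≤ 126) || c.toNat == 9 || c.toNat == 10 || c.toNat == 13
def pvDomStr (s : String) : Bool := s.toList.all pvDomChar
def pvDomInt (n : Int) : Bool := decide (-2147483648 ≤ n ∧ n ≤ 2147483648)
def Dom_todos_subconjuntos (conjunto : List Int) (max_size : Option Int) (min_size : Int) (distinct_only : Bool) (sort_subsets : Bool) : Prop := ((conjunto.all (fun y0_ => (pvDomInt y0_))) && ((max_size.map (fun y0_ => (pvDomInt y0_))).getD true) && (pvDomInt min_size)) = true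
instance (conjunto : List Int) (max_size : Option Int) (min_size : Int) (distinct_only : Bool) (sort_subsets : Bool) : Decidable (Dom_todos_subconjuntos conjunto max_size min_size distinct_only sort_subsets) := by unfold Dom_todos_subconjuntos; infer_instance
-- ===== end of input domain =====

-- B replaces the itertools.combinations-per-size + chain + listify/sort passes by one
-- hand-written backtracking generator over start indices (same order, same cost): an
-- alternative decomposition, not claimed faster.


-- ===== PORT A =====
-- itertools.combinations(l, r): size-r tuples in index-lexicographic order (standard recursive definition)
def combos : Nat → List Int → List (List Int)
  | 0, _ => [[]]
  | _ + 1, [] => []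
  | r + 1, x :: xs => (combos r xs).map (fun c => x :: c) ++ combos (r + 1) xs

def todos_subconjuntos (conjunto : List Int) (max_size : Option Int) (min_size : Int) (distinct_only : Bool) (sort_subsets : Bool) : List (List Int) :=
  -- 'if distinct_only: conjunto = list(set(conjunto))' — Pre_ restricts to sort_subsets=True here, where set order washes out
  let c := if distinct_only then PySem.Set.ofList conjunto else conjunto
  -- 'max_size or len(conjunto)' (0 and None both fall back to the length)
  let hi : Int := match max_size with
    | none => (c.length : Int)
    | some m => if m = 0 then (c.length : Int) else m
  -- chain.from_iterable(combinations(c, r) for r in range(min_size, hi + 1)); r.toNat is exact under Pre_ (0 ≤ min_size)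
  let subs := (PySem.List.pyRange min_size (hi + 1) 1).foldl (fun acc r => acc ++ combos r.toNat c) []
  -- '[list(s) for s in subs]' is the identity at this type
  let subs := if sort_subsets then subs.map (fun s => PySem.List.sorted s (fun x => x) false) else subs
  if sort_subsets then PySem.List.sorted subs (fun s => s) false else subs

-- ===== PORT B =====
-- rec(start, need, prefix): backtracking emission of all size-need extensions by indices ≥ start
def altRec (pool : List Int) (ss : Bool) : Nat → Nat → List Int → List (List Int)
  | 0, _, pref => [if ss then PySem.List.sorted pref (fun x => x) false else pref]
  | need + 1, start, pref =>
      (List.range' start ((pool.length - need) - start)).foldl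
        (fun acc i => acc ++ altRec pool ss need (i + 1) (pref ++ [pool.getD i 0])) []

def todos_subconjuntos_alt (conjunto : List Int) (max_size : Option Int) (min_size : Int) (distinct_only : Bool) (sort_subsets : Bool) : List (List Int) :=
  -- 'list(dict.fromkeys(conjunto))' = PySem.List.dedup = PySem.Set.ofList
  let pool := if distinct_only then PySem.List.dedup conjunto else conjunto
  let n := pool.length
  let hi : Int := match max_size with
    | none => (n : Int)
    | some m => if m = 0 then (n : Int) else m
  -- 'while r <= hi' counting loop = range(min_size, hi + 1)
  let out := (PySem.List.pyRange min_size (hi + 1) 1).foldl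
    (fun acc r => if 0 ≤ r ∧ r ≤ (n : Int) then acc ++ altRec pool sort_subsets r.toNat 0 [] else acc) []
  if sort_subsets then PySem.List.sorted out (fun s => s) false else out

-- ===== PRECONDITION & SPEC =====
-- Pre_ excludes (a) min_size < 0, where Python A raises ValueError (combinations with negative r), and
-- (b) distinct_only=True with sort_subsets=False, where A's output order is an accident of CPython's
-- set iteration order (not modelled); with sort_subsets=True the global sort makes set order irrelevant.
def Pre_todos_subconjuntos (conjunto : List Int) (max_size : Option Int) (min_size : Int) (distinct_only : Bool) (sort_subsets : Bool) : Prop :=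
  0 ≤ min_size ∧ (distinct_only = true → sort_subsets = true)
instance (conjunto : List Int) (max_size : Option Int) (min_size : Int) (distinct_only : Bool) (sort_subsets : Bool) : Decidable (Pre_todos_subconjuntos conjunto max_size min_size distinct_only sort_subsets) := by unfold Pre_todos_subconjuntos; infer_instance
def pvWitness_todos_subconjuntos : List Int × Option Int × Int × Bool × Bool := ([1, 2], none, 0, false, false)

def Spec_todos_subconjuntos (conjunto : List Int) (max_size : Option Int) (min_size : Int) (distinct_only : Bool) (sort_subsets : Bool) (out : List (List Int)) : Prop := out = todos_subconjuntos_alt conjunto max_size min_size distinct_only sort_subsets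
instance (conjunto : List Int) (max_size : Option Int) (min_size : Int) (distinct_only : Bool) (sort_subsets : Bool) (out : List (List Int)) : Decidable (Spec_todos_subconjuntos conjunto max_size min_size distinct_only sort_subsets out) := by unfold Spec_todos_subconjuntos; infer_instance

-- ===== CLAIM (what is proved, stated in full; the proofs are below) =====
def Claim_equal_todos_subconjuntos : Prop := ∀ (conjunto : List Int) (max_size : Option Int) (min_size : Int) (distinct_only : Bool) (sort_subsets : Bool), Dom_todos_subconjuntos conjunto max_size min_size distinct_only sort_subsets → Pre_todos_subconjuntos conjunto max_size min_size distinct_only sort_subsets → Spec_todos_subconjuntos conjunto max_size min_size distinct_only sort_subsets (todos_subconjuntos conjunto max_size min_size distinct_only sort_subsets)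

-- ===== LEMMAS AND PROOFS =====

-- the per-subset post-processing B applies at emission
def pvEmit (ss : Bool) (l : List Int) : List Int :=
  if ss then PySem.List.sorted l (fun x => x) false else l

lemma combos_eq_nil {r : Nat} {l : List Int} (h : l.length < r) : combos r l = [] := by
  induction l generalizing r with
  | nil => cases r with
    | zero => simp at h
    | succ r => rfl
  | cons x xs ih =>
    cases r with
    | zero => simp at h
    | succ r =>
      simp only [combos]
      rw [ih (by simpa using Nat.lt_of_succ_lt_succ h), ih (by simp at h ⊢; omega)]
      rfl

lemma altRec_eq (pool : List Int) (ss : Bool) :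
    ∀ (need start : Nat) (pref : List Int),
      altRec pool ss need start pref
        = (combos need (pool.drop start)).map (fun c => pvEmit ss (pref ++ c)) := by
  intro need
  induction need with
  | zero => intro start pref; simp [altRec, combos, pvEmit]
  | succ need ih =>
    suffices H : ∀ (k start : Nat), pool.length - start ≤ k → ∀ (pref : List Int),
        altRec pool ss (need + 1) start pref
          = (combos (need + 1) (pool.drop start)).map (fun c => pvEmit ss (pref ++ c)) by
      intro start pref; exact H _ start le_rfl pref
    intro k
    induction k with
    | zero =>
      intro start hk pref
      have hdrop : pool.drop start = [] := List.drop_eq_nil_of_le (by omega)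
      have hcnt : (pool.length - need) - start = 0 := by omega
      simp [altRec, hcnt, hdrop, combos]
    | succ k ihk =>
      intro start hk pref
      simp only [altRec, PySem.List.foldl_append_eq_flatMap, List.nil_append]
      by_cases hlt : start < pool.length - need
      · have hcnt : (pool.length - need) - start = ((pool.length - need) - (start + 1)) + 1 := by omega
        have hsl : start < pool.length := by omega
        have hdrop : pool.drop start = pool[start] :: pool.drop (start + 1) :=
          List.drop_eq_getElem_cons hsl
        rw [hcnt, List.range'_succ, List.flatMap_cons]
        have hrest :
            (List.range' (start + 1) ((pool.length - need) - (start + 1))).flatMap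
                (fun i => altRec pool ss need (i + 1) (pref ++ [pool.getD i 0]))
              = (combos (need + 1) (pool.drop (start + 1))).map (fun c => pvEmit ss (pref ++ c)) := by
          have := ihk (start + 1) (by omega) pref
          simpa only [altRec, PySem.List.foldl_append_eq_flatMap, List.nil_append] using this
        rw [hrest, ih (start + 1) (pref ++ [pool.getD start 0]), hdrop]
        simp only [combos, List.map_append, List.map_map]
        congr 1
        apply List.map_congr_left
        intro c _
        simp [Function.comp, List.getElem?_eq_getElem hsl, List.append_assoc]
      · have hcnt : (pool.length - need) - start = 0 := by omega
        have hlen : (pool.drop start).length < need + 1 := by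
          simp only [List.length_drop]; omega
        rw [hcnt, combos_eq_nil hlen]
        simp

lemma flatMap_branch (pool : List Int) (ss : Bool) (r : Int) (h0 : 0 ≤ r) :
    (if 0 ≤ r ∧ r ≤ (pool.length : Int) then altRec pool ss r.toNat 0 [] else [])
      = (combos r.toNat pool).map (pvEmit ss) := by
  by_cases hle : r ≤ (pool.length : Int)
  · rw [if_pos ⟨h0, hle⟩, altRec_eq]
    simp
  · rw [if_neg (by tauto), combos_eq_nil (show pool.length < r.toNat by omega)]
    simp

lemma main_core (P rs : List Int) (hrs : ∀ r ∈ rs, 0 ≤ r) (ss : Bool) :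
    (let subs := rs.foldl (fun acc r => acc ++ combos r.toNat P) [];
     let subs := if ss then subs.map (fun s => PySem.List.sorted s (fun x => x) false) else subs;
     if ss then PySem.List.sorted subs (fun s => s) false else subs)
    = (let out := rs.foldl (fun acc r =>
          if 0 ≤ r ∧ r ≤ (P.length : Int) then acc ++ altRec P ss r.toNat 0 [] else acc) [];
       if ss then PySem.List.sorted out (fun s => s) false else out) := by
  have hA : rs.foldl (fun acc r => acc ++ combos r.toNat P) []
      = rs.flatMap (fun r => combos r.toNat P) := by
    simpa using PySem.List.foldl_append_eq_flatMap (fun r => combos r.toNat P) (l := rs) (acc := [])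
  have hB1 : ∀ (acc : List (List Int)) (r : Int), r ∈ rs →
      (if 0 ≤ r ∧ r ≤ (P.length : Int) then acc ++ altRec P ss r.toNat 0 [] else acc)
      = acc ++ (if 0 ≤ r ∧ r ≤ (P.length : Int) then altRec P ss r.toNat 0 [] else []) := by
    intro acc r _; split_ifs <;> simp
  have hB : rs.foldl (fun acc r =>
        if 0 ≤ r ∧ r ≤ (P.length : Int) then acc ++ altRec P ss r.toNat 0 [] else acc) []
      = (rs.flatMap (fun r => combos r.toNat P)).map (pvEmit ss) := by
    rw [PySem.List.foldl_congr_mem _ _ _ _ hB1]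
    rw [PySem.List.foldl_append_eq_flatMap]
    simp only [List.nil_append]
    rw [List.flatMap_congr (h := fun r hr => flatMap_branch P ss r (hrs r hr))]
    rw [List.map_flatMap]
  simp only []
  rw [hA, hB]
  cases ss with
  | false =>
    rw [show pvEmit false = fun (l : List Int) => l from rfl]
    simp
  | true =>
    rw [show pvEmit true = fun (l : List Int) => PySem.List.sorted l (fun x => x) false from rfl]
    simp

-- ===== VERDICT (by name: the statement is the Claim_ definition above) =====
theorem todos_subconjuntos_spec : Claim_equal_todos_subconjuntos := by
  intro conjunto max_size min_size distinct_only sort_subsets _ hpre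
  obtain ⟨hmin, _⟩ := hpre
  unfold Spec_todos_subconjuntos todos_subconjuntos todos_subconjuntos_alt
  simp only [PySem.List.dedup_eq_ofList]
  exact main_core _ _ (fun r hr => le_trans hmin (PySem.List.mem_pyRange_one.mp hr).1) _
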